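-- pv_equiv track=rewrite | github.com/Lautarostuve/LexerPY | algoritmolexer.py | automataoprel
-- ===== SOURCE A (Python) =====
-- ESTADO_FINAL="Estado final"
--
-- ESTADO_TRAMPA="Estado trampa"
--
-- ESTADO_NO_FINAL="Estado aceptado"
--
-- def automataoprel(lexema):
--     estado = 0
--     estados_finales = [1,2]
--     for caracter in lexema:
--         if estado == 0 and caracter == '=':
--             estado = 3
--
--         elif estado == 0 and caracter == '>':
--             estado = 2
--
--         elif estado == 0 and caracter == '<':
--             estado = 2
--
--         elif estado == 0 and caracter == '!':
--             estado = 3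
--
--         elif estado == 2 and caracter == '=':
--             estado = 1
--
--         elif estado == 3 and caracter == '=':
--             estado = 1
--
--         else:
--             estado = -1
--             break
--
--     if estado == -1:
--         return ESTADO_TRAMPA
--     elif estado in estados_finales:
--         return ESTADO_FINAL
--     else:
--         return ESTADO_NO_FINAL
-- ===== SOURCE B (Python) =====
-- ESTADO_FINAL="Estado final"
-- ESTADO_TRAMPA="Estado trampa"
-- ESTADO_NO_FINAL="Estado aceptado"
--
-- FINALES = {'>', '<', '==', '>=', '<=', '!='}
-- ACEPTADOS = {'', '=', '!'}
--
-- def automataoprel(lexema):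
--     if lexema in FINALES:
--         return ESTADO_FINAL
--     if lexema in ACEPTADOS:
--         return ESTADO_NO_FINAL
--     return ESTADO_TRAMPA
-- ===== Notes on version B (the rewrite author's own statement) =====
-- stated objective: simpler
-- what changed: Replaced the per-character DFA state loop with direct whole-string membership in the two small fixed sets of lexemes the automaton accepts (final: >,<,==,>=,<=,!=; non-final accepted: '', '=', '!').
import Mathlib
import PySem

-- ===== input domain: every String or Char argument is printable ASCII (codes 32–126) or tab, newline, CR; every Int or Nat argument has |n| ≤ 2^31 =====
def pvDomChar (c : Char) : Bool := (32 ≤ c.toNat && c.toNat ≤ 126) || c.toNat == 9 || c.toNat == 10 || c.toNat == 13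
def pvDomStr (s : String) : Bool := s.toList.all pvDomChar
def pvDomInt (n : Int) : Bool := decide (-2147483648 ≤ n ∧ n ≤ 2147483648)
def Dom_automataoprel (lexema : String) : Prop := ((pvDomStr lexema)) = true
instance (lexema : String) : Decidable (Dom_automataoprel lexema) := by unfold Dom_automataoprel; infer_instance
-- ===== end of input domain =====

-- B replaces A's per-character DFA loop by direct membership of the whole lexeme in the two
-- fixed sets of strings the automaton accepts (objective: simpler).

-- ===== PORT A =====
-- A's loop with its `break`: once estado = -1 no branch fires, so the break is equivalently
-- a fold whose step keeps -1 absorbing (the broken-out state is exactly -1).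
def stepA (estado : Int) (caracter : Char) : Int :=
  if estado = 0 ∧ caracter = '=' then 3
  else if estado = 0 ∧ caracter = '>' then 2
  else if estado = 0 ∧ caracter = '<' then 2
  else if estado = 0 ∧ caracter = '!' then 3
  else if estado = 2 ∧ caracter = '=' then 1
  else if estado = 3 ∧ caracter = '=' then 1
  else -1

def automataoprel (lexema : String) : String :=
  let estado := lexema.toList.foldl stepA 0
  if estado = -1 then "Estado trampa"
  else if estado = 1 ∨ estado = 2 then "Estado final"
  else "Estado aceptado"

-- ===== PORT B =====
def automataoprel_alt (lexema : String) : String :=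
  if lexema ∈ ([">", "<", "==", ">=", "<=", "!="] : List String) then "Estado final"
  else if lexema ∈ (["", "=", "!"] : List String) then "Estado aceptado"
  else "Estado trampa"

-- ===== PRECONDITION & SPEC =====
def Spec_automataoprel (lexema : String) (out : String) : Prop := out = automataoprel_alt lexema
instance (lexema : String) (out : String) : Decidable (Spec_automataoprel lexema out) := by unfold Spec_automataoprel; infer_instance

-- ===== CLAIM (what is proved, stated in full; the proofs are below) =====
def Claim_equal_automataoprel : Prop := ∀ (lexema : String), Dom_automataoprel lexema → Spec_automataoprel lexema (automataoprel lexema)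

-- ===== LEMMAS AND PROOFS =====

lemma stepA_one (c : Char) : stepA 1 c = -1 := by
  simp [stepA]

lemma foldl_trap : ∀ l : List Char, l.foldl stepA (-1) = -1 := by
  intro l; induction l with
  | nil => rfl
  | cons c l ih => simpa [stepA] using ih

lemma foldl_one_cons (c : Char) (l : List Char) :
    (c :: l).foldl stepA 1 = -1 := by
  simp [List.foldl, stepA_one, foldl_trap]

lemma stepA_neg (c : Char) : stepA (-1) c = -1 := by
  simp [stepA]

lemma stepA_from2 (c : Char) : stepA 2 c = 1 ∨ stepA 2 c = -1 := by
  by_cases h : c = '=' <;> simp [stepA, h]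

lemma stepA_from3 (c : Char) : stepA 3 c = 1 ∨ stepA 3 c = -1 := by
  by_cases h : c = '=' <;> simp [stepA, h]

lemma stepA_vals (s : Int) (c : Char) :
    stepA s c = 1 ∨ stepA s c = 2 ∨ stepA s c = 3 ∨ stepA s c = -1 := by
  unfold stepA; split_ifs <;> omega

lemma stepA2_small (s : Int) (c d : Char) :
    stepA (stepA s c) d = 1 ∨ stepA (stepA s c) d = -1 := by
  rcases stepA_vals s c with h | h | h | h <;> rw [h]
  · exact .inr (stepA_one d)
  · exact stepA_from2 d
  · exact stepA_from3 d
  · exact .inr (stepA_neg d)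

theorem automataoprel_spec : Claim_equal_automataoprel := by
  unfold Claim_equal_automataoprel
  intro lexema _
  unfold Spec_automataoprel automataoprel automataoprel_alt
  simp only [List.mem_cons, List.not_mem_nil, or_false, String.ext_iff,
    show (">" : String).toList = ['>'] from by decide,
    show ("<" : String).toList = ['<'] from by decide,
    show ("==" : String).toList = ['=', '='] from by decide,
    show (">=" : String).toList = ['>', '='] from by decide,
    show ("<=" : String).toList = ['<', '='] from by decide,
    show ("!=" : String).toList = ['!', '='] from by decide,
    show ("" : String).toList = [] from by decide,
    show ("=" : String).toList = ['='] from by decide,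
    show ("!" : String).toList = ['!'] from by decide]
  generalize lexema.toList = l
  match l with
  | [] => simp
  | [c] =>
    by_cases h1 : c = '=' <;> by_cases h2 : c = '>' <;> by_cases h3 : c = '<' <;>
      by_cases h4 : c = '!' <;>
    simp_all [List.foldl, stepA]
  | [c, d] =>
    by_cases h1 : c = '=' <;> by_cases h2 : c = '>' <;> by_cases h3 : c = '<' <;>
      by_cases h4 : c = '!' <;> by_cases h5 : d = '=' <;>
    simp_all [List.foldl, stepA]
  | c :: d :: e :: rest =>
    have htrap : (c :: d :: e :: rest).foldl stepA 0 = -1 := by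
      show ((e :: rest).foldl stepA (stepA (stepA 0 c) d)) = -1
      rcases stepA2_small 0 c d with h | h <;> rw [h]
      · exact foldl_one_cons e rest
      · exact foldl_trap (e :: rest)
    rw [htrap]
    simp
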